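-- pv_equiv track=rewrite | github.com/KamKava/easy_to_remember | Implementation/Easy_to_remember/rules/plate/leet_rule.py | letters_to_digits
-- ===== SOURCE A (Python) =====
-- letter_to_digit = {
--     "O" : "0",
--     "I" : "1",
--     "E" : "3",
--     "A" : "4",
--     "S" : "5",
--     "T" : "7",
--     "B" : "8"
-- }
--
-- def letters_to_digits(s:str) -> str:
--     out = []
--     for ch in s.upper():
--         if ch.isalpha():
--             out.append(letter_to_digit.get(ch, ch))
--         elif ch.isdigit():
--             out.append(ch)
--     return "".join(out)
-- ===== SOURCE B (Python) =====
-- # Precompute, once at module level, a dense 128-entry table OUT where OUT[code] is the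
-- # final output (already uppercased, leet-substituted, or '' if dropped) for that ASCII
-- # code; the function itself is then a single branch-free gather over the table.
-- # (The table covers ASCII; inputs are ASCII per the stated domain.)
-- _LEET = {"O": "0", "I": "1", "E": "3", "A": "4", "S": "5", "T": "7", "B": "8"}
--
-- _OUT = []
-- for _i in range(128):
--     _u = chr(_i).upper()
--     if _u.isalpha() or _u.isdigit():
--         _OUT.append(_LEET.get(_u, _u))
--     else:
--         _OUT.append("")
--
-- def letters_to_digits(s: str) -> str:
--     return "".join([_OUT[b] for b in map(ord, s)])
-- ===== Notes on version B (the rewrite author's own statement) =====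
-- stated objective: alternative
-- what changed: Replaces A's per-character branch-and-dict-lookup loop (after a full s.upper() pass) by a dense 128-entry output table precomputed once at module level (uppercasing, leet substitution and the alphanumeric filter all folded into the table), so the function is a single branch-free gather indexed by character code.
import Mathlib
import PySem

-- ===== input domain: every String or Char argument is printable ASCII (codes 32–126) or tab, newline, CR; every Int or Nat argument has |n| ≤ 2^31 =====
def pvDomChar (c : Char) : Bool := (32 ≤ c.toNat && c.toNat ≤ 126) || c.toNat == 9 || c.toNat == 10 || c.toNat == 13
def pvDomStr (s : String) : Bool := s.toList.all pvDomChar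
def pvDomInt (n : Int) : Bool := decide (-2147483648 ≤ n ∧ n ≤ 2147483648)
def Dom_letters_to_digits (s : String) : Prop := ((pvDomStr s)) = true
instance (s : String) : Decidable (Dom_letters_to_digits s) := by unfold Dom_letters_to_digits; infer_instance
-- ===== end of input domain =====

-- B precomputes a dense 128-entry output table once (uppercasing, leet substitution and
-- filtering folded into the table) and the function is a single branch-free gather by
-- character code — an alternative decomposition of the same O(n) task.

-- ===== PORT A =====
-- module-level dict letter_to_digit (one-character Python strings ported as Char)
def letterToDigit : PySem.Dict Char Char :=
  PySem.Dict.ofList [('O','0'),('I','1'),('E','3'),('A','4'),('S','5'),('T','7'),('B','8')]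

def letters_to_digits (s : String) : String :=
  String.mk ((PySem.Chars.upper s.toList).foldl (fun out ch =>
    if PySem.Chars.isalpha ch then out ++ [letterToDigit.getD ch ch]
    else if PySem.Chars.isdigit ch then out ++ [ch]
    else out) [])

-- ===== PORT B =====
-- _LEET dict (one-character Python strings ported as Char)
def leetDictB : PySem.Dict Char Char :=
  PySem.Dict.ofList [('O','0'),('I','1'),('E','3'),('A','4'),('S','5'),('T','7'),('B','8')]

-- _OUT: the module-level table-building loop over range(128); entry i is the output
-- text for code i ('' when the character is dropped)
def outTable : List (List Char) :=
  (List.range 128).map (fun i =>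
    let u := PySem.Chars.upperChar (Char.ofNat i)   -- chr(i).upper(), one ASCII char
    if PySem.Chars.isalpha u || PySem.Chars.isdigit u then [leetDictB.getD u u] else [])

-- "".join([_OUT[b] for b in map(ord, s)]); the getD default is unreachable for the
-- ASCII inputs of the stated domain (Python would raise IndexError past the table)
def letters_to_digits_alt (s : String) : String :=
  String.mk (PySem.Chars.join [] (s.toList.map (fun c => outTable.getD c.toNat [])))

-- ===== PRECONDITION & SPEC =====
def Spec_letters_to_digits (s : String) (out : String) : Prop := out = letters_to_digits_alt s
instance (s : String) (out : String) : Decidable (Spec_letters_to_digits s out) := by unfold Spec_letters_to_digits; infer_instance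

-- ===== CLAIM (what is proved, stated in full; the proofs are below) =====
def Claim_equal_letters_to_digits : Prop := ∀ (s : String), Dom_letters_to_digits s → Spec_letters_to_digits s (letters_to_digits s)

-- ===== LEMMAS AND PROOFS =====

-- A's per-character contribution
def contribA (c : Char) : List Char :=
  if PySem.Chars.isalpha c then [letterToDigit.getD c c]
  else if PySem.Chars.isdigit c then [c]
  else []

-- A's loop appends contribA per character
theorem foldlA_eq (l : List Char) (acc : List Char) :
    l.foldl (fun out ch =>
      if PySem.Chars.isalpha ch then out ++ [letterToDigit.getD ch ch]
      else if PySem.Chars.isdigit ch then out ++ [ch]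
      else out) acc = acc ++ l.flatMap contribA := by
  induction l generalizing acc with
  | nil => simp
  | cons c l ih =>
    simp only [List.foldl_cons, List.flatMap_cons, ih, contribA]
    split_ifs <;> simp

-- joining with the empty separator is flattening
theorem join_nil_eq_flatten (l : List (List Char)) :
    PySem.Chars.join [] l = l.flatten := by
  induction l with
  | nil => rfl
  | cons x l ih =>
    cases l with
    | nil => simp [PySem.Chars.join, List.intercalate]
    | cons y l =>
      simpa [PySem.Chars.join, List.intercalate] using
        congrArg (x ++ ·) (by simpa [PySem.Chars.join, List.intercalate] using ih)

-- a character that is not a leet key translates to itself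
theorem getD_of_not_key (c : Char) (h : c ∉ ['O','I','E','A','S','T','B']) :
    letterToDigit.getD c c = c := by
  simp only [List.mem_cons, List.not_mem_nil, or_false, not_or] at h
  obtain ⟨h1, h2, h3, h4, h5, h6, h7⟩ := h
  have hit : letterToDigit =
      PySem.Dict.mk [('O','0'),('I','1'),('E','3'),('A','4'),('S','5'),('T','7'),('B','8')] := by
    decide
  simp [hit, PySem.Dict.getD, PySem.Dict.get?,
    Ne.symm h1, Ne.symm h2, Ne.symm h3, Ne.symm h4, Ne.symm h5, Ne.symm h6, Ne.symm h7]

-- the two dict literals coincide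
theorem dicts_eq : leetDictB = letterToDigit := by decide

-- B's table-build classification equals A's per-character contribution, for any char
theorem entry_eq_contrib (u : Char) :
    (if PySem.Chars.isalpha u || PySem.Chars.isdigit u
      then [leetDictB.getD u u] else []) = contribA u := by
  rw [dicts_eq]
  by_cases hk : u ∈ ['O','I','E','A','S','T','B']
  · simp only [List.mem_cons, List.not_mem_nil, or_false] at hk
    rcases hk with rfl | rfl | rfl | rfl | rfl | rfl | rfl <;> decide
  · cases ha : PySem.Chars.isalpha u <;> cases hd : PySem.Chars.isdigit u <;>
      simp [contribA, ha, hd, getD_of_not_key u hk]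

-- indexing the table at a domain character reads A's contribution for its uppercase
theorem table_lookup (c : Char) (hc : pvDomChar c = true) :
    outTable.getD c.toNat [] = contribA (PySem.Chars.upperChar c) := by
  have hlt : c.toNat < 128 := by
    simp only [pvDomChar, Bool.or_eq_true, Bool.and_eq_true, decide_eq_true_eq,
      beq_iff_eq] at hc
    omega
  have := List.getD_eq_getElem?_getD (l := outTable) (i := c.toNat) (a := ([] : List Char))
  rw [this]
  unfold outTable
  rw [List.getElem?_map, List.getElem?_range hlt]
  simp only [Option.map_some, Option.getD_some, Char.ofNat_toNat]
  exact entry_eq_contrib (PySem.Chars.upperChar c)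

-- ===== VERDICT (by name: the statement is the Claim_ definition above) =====
theorem letters_to_digits_spec : Claim_equal_letters_to_digits := by
  intro s hdom
  have hall : ∀ c ∈ s.toList, pvDomChar c = true := by
    simpa [Dom_letters_to_digits, pvDomStr, List.all_eq_true] using hdom
  unfold Spec_letters_to_digits letters_to_digits letters_to_digits_alt
  rw [foldlA_eq, join_nil_eq_flatten, List.nil_append]
  congr 1
  rw [PySem.Chars.upper, List.flatMap_map, ← List.flatMap_def]
  exact List.flatMap_congr (fun c hc => (table_lookup c (hall c hc)).symm)
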